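-- pv_equiv track=rewrite | github.com/pypi-data/pypi-mirror-341 | packages/vitamin-model-checker/vitamin-model-checker-1.4a0.tar.gz/vitamin-model-checker-1.4a0/vitamin_model_checker/model_checker_interface/explicit/CTL/CTL.py | pre_image_all
-- ===== SOURCE A (Python) =====
-- def pre_image_all(transitions, list_holds_p):
--     pre_list = set()
--     for state in list(list_holds_p):
--         predecessors = {s for s, t in transitions if t == state}
--         for predecessor in predecessors:
--             successor_states = {t for s, t in transitions if s == predecessor}
--             if successor_states.issubset(list_holds_p):
--                 pre_list.add(predecessor)
--     return pre_list
-- ===== SOURCE B (Python) =====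
-- def pre_image_all(transitions, list_holds_p):
--     succ_map = {}
--     pred_map = {}
--     for s, t in transitions:
--         succ_map.setdefault(s, []).append(t)
--         pred_map.setdefault(t, []).append(s)
--     holds = set(list_holds_p)
--     result = set()
--     for state in list_holds_p:
--         for p in pred_map.get(state, []):
--             if all(t in holds for t in succ_map[p]):
--                 result.add(p)
--     return result
-- ===== Notes on version B (the rewrite author's own statement) =====
-- stated objective: alternative
-- what changed: Instead of rescanning the whole transition list for the predecessors of each holds-state and again for the successors of each candidate, B builds successor and predecessor adjacency dicts in one pass over transitions and answers each query by a dict lookup plus membership tests in a set built once from list_holds_p.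
import Mathlib
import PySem

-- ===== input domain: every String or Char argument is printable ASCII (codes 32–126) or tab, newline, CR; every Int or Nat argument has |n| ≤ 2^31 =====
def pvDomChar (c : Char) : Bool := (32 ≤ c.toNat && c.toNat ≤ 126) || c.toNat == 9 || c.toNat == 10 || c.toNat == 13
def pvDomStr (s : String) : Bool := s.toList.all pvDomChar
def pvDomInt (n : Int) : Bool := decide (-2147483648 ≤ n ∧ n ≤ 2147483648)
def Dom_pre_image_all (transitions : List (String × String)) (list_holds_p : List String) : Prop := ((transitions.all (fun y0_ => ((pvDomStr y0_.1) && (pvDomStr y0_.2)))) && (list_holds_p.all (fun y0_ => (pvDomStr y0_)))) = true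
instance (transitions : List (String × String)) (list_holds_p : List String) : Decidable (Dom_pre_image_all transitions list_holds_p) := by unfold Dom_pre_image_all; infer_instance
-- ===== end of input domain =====

-- B replaces A's repeated full scans of `transitions` by successor/predecessor adjacency
-- dicts built in one pass plus a membership set for list_holds_p; both Pythons return a set,
-- the ports return its element list.

-- ===== PORT A =====
-- literal transliteration of A: for each holds-state, a predecessor set by a full scan of
-- transitions, then for each predecessor a successor set by another full scan, subset test, add.
def pre_image_all (transitions : List (String × String)) (list_holds_p : List String) : List String :=
  list_holds_p.foldl (fun pre_list state =>
    let predecessors : PySem.Set String :=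
      PySem.Set.ofList (transitions.filterMap (fun p => if p.2 = state then some p.1 else none))
    predecessors.foldl (fun pre_list predecessor =>
      let successor_states : PySem.Set String :=
        PySem.Set.ofList (transitions.filterMap (fun p => if p.1 = predecessor then some p.2 else none))
      if PySem.Set.issubset successor_states list_holds_p then PySem.Set.add pre_list predecessor
      else pre_list) pre_list)
    PySem.Set.empty

-- ===== PORT B =====
-- literal transliteration of B (Source B): one pass builds succ_map and pred_map (dicts of lists),
-- then each query is a dict lookup plus membership tests in the holds set.
def pre_image_all_alt (transitions : List (String × String)) (list_holds_p : List String) : List String :=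
  let maps := transitions.foldl
    (fun (m : PySem.Dict String (List String) × PySem.Dict String (List String)) p =>
      (m.1.modify p.1 [] (· ++ [p.2]), m.2.modify p.2 [] (· ++ [p.1])))
    (PySem.Dict.empty, PySem.Dict.empty)
  let holds : PySem.Set String := PySem.Set.ofList list_holds_p
  list_holds_p.foldl (fun result state =>
    (maps.2.getD state []).foldl (fun result p =>
      if (maps.1.getD p []).all (fun t => holds.contains t) then PySem.Set.add result p
      else result) result)
    PySem.Set.empty

-- ===== PRECONDITION & SPEC =====
def Spec_pre_image_all (transitions : List (String × String)) (list_holds_p : List String) (out : List String) : Prop := out = pre_image_all_alt transitions list_holds_p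
instance (transitions : List (String × String)) (list_holds_p : List String) (out : List String) : Decidable (Spec_pre_image_all transitions list_holds_p out) := by unfold Spec_pre_image_all; infer_instance

-- ===== CLAIM (what is proved, stated in full; the proofs are below) =====
def Claim_equal_pre_image_all : Prop := ∀ (transitions : List (String × String)) (list_holds_p : List String), Dom_pre_image_all transitions list_holds_p → Spec_pre_image_all transitions list_holds_p (pre_image_all transitions list_holds_p)

-- ===== LEMMAS AND PROOFS =====

theorem pv_ofList_append_singleton (L : List String) (x : String) :
    PySem.Set.ofList (L ++ [x]) = PySem.Set.add (PySem.Set.ofList L) x := by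
  rw [PySem.Set.ofList_append]; rfl

-- filter commutes with first-occurrence dedup
theorem pv_filter_ofList (c : String → Bool) (L : List String) :
    (PySem.Set.ofList L).filter c = PySem.Set.ofList (L.filter c) := by
  induction L using List.reverseRecOn with
  | nil => rfl
  | append_singleton L x ih =>
    rw [pv_ofList_append_singleton, List.filter_append]
    by_cases hcx : c x = true
    · rw [show List.filter c [x] = [x] by simp [hcx], pv_ofList_append_singleton]
      by_cases hm : x ∈ L
      · rw [show PySem.Set.add (PySem.Set.ofList L) x = PySem.Set.ofList L by
              simp [PySem.Set.add]; exact hm,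
            show PySem.Set.add (PySem.Set.ofList (L.filter c)) x = PySem.Set.ofList (L.filter c) by
              simp [PySem.Set.add]; exact ⟨hm, hcx⟩]
        exact ih
      · rw [show PySem.Set.add (PySem.Set.ofList L) x = PySem.Set.ofList L ++ [x] by
              simp [PySem.Set.add]; exact hm,
            show PySem.Set.add (PySem.Set.ofList (L.filter c)) x
                = PySem.Set.ofList (L.filter c) ++ [x] by
              simp [PySem.Set.add]; exact fun hxl => absurd hxl hm,
            List.filter_append, ih, show List.filter c [x] = [x] by simp [hcx]]
    · rw [show List.filter c [x] = ([] : List String) by simp [hcx], List.append_nil]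
      by_cases hm : x ∈ L
      · rw [show PySem.Set.add (PySem.Set.ofList L) x = PySem.Set.ofList L by
              simp [PySem.Set.add]; exact hm]
        exact ih
      · rw [show PySem.Set.add (PySem.Set.ofList L) x = PySem.Set.ofList L ++ [x] by
              simp [PySem.Set.add]; exact hm,
            List.filter_append, ih, show List.filter c [x] = ([] : List String) by simp [hcx],
            List.append_nil]

-- updating with a deduplicated copy is updating with the original list
theorem pv_update_add (acc s : PySem.Set String) (x : String) :
    PySem.Set.update acc (PySem.Set.add s x) = PySem.Set.add (PySem.Set.update acc s) x := by
  by_cases h : PySem.Set.contains s x = true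
  · have hx : x ∈ s := by
      simpa [PySem.Set.contains, List.contains_eq_mem] using h
    rw [show PySem.Set.add s x = s by simp [PySem.Set.add]; exact hx,
      show PySem.Set.add (PySem.Set.update acc s) x = PySem.Set.update acc s by
        simp [PySem.Set.add]; exact fun _ => hx]
  · have hxs : x ∉ s := by
      simpa [PySem.Set.contains, List.contains_eq_mem] using h
    rw [show PySem.Set.add s x = s ++ [x] by simp [PySem.Set.add]; exact hxs,
      PySem.Set.update_eq_foldl, List.foldl_append, ← PySem.Set.update_eq_foldl]
    rfl

theorem pv_update_update (acc s : PySem.Set String) (M : List String) :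
    PySem.Set.update acc (PySem.Set.update s M) = PySem.Set.update (PySem.Set.update acc s) M := by
  induction M generalizing s with
  | nil => rfl
  | cons x M ih =>
    have hl : PySem.Set.update s (x :: M) = PySem.Set.update (s.add x) M := by
      rw [PySem.Set.update_eq_foldl, List.foldl_cons, ← PySem.Set.update_eq_foldl]
    have hr : PySem.Set.update (PySem.Set.update acc s) (x :: M)
        = PySem.Set.update ((PySem.Set.update acc s).add x) M := by
      rw [PySem.Set.update_eq_foldl, List.foldl_cons, ← PySem.Set.update_eq_foldl]
    rw [hl, hr, ih (s.add x), pv_update_add]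

theorem pv_update_ofList (acc : PySem.Set String) (M : List String) :
    PySem.Set.update acc (PySem.Set.ofList M) = PySem.Set.update acc M := by
  have h := pv_update_update acc PySem.Set.empty M
  rw [show PySem.Set.update PySem.Set.empty M = PySem.Set.ofList M by
        rw [PySem.Set.update_eq_foldl, PySem.Set.ofList_eq_foldl]; rfl,
      show PySem.Set.update acc PySem.Set.empty = acc from rfl] at h
  exact h

-- dedup before a conditional-add fold changes nothing
theorem pv_foldl_step_ofList (c : String → Bool) (acc : PySem.Set String) (L : List String) :
    (PySem.Set.ofList L).foldl (fun a x => if c x then PySem.Set.add a x else a) acc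
      = L.foldl (fun a x => if c x then PySem.Set.add a x else a) acc := by
  rw [← List.foldl_filter (p := c) (f := PySem.Set.add),
    ← List.foldl_filter (p := c) (f := PySem.Set.add),
    pv_filter_ofList, ← PySem.Set.update_eq_foldl, ← PySem.Set.update_eq_foldl,
    pv_update_ofList]

-- a first-component scan is A's successor filterMap
theorem pv_scan_fst (l : List (String × String)) (v : String) :
    List.map (fun x => x.2) (List.filter (fun q => q.1 == v) l)
      = l.filterMap (fun q => if q.1 = v then some q.2 else none) := by
  induction l with
  | nil => rfl
  | cons q l ih => by_cases h : q.1 = v <;> simp [h, ih]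

-- a second-component scan (via swap) is A's predecessor filterMap
theorem pv_scan_snd (l : List (String × String)) (st : String) :
    List.map (fun x => x.2) (List.filter (fun q => q.1 == st) (l.map Prod.swap))
      = l.filterMap (fun p => if p.2 = st then some p.1 else none) := by
  induction l with
  | nil => rfl
  | cons q l ih => by_cases h : q.2 = st <;> simp [h, ih]

-- B's predecessor lookup is A's predecessor scan (before dedup)
theorem pv_pred_eq (transitions : List (String × String)) (state : String) :
    (transitions.foldl (fun d q => d.modify q.2 [] (· ++ [q.1])) PySem.Dict.empty).getD state []
    = transitions.filterMap (fun p => if p.2 = state then some p.1 else none) := by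
  have h1 : transitions.foldl (fun d q => d.modify q.2 [] (· ++ [q.1])) PySem.Dict.empty
      = (transitions.map Prod.swap).foldl (fun d q => d.modify q.1 [] (· ++ [q.2]))
          PySem.Dict.empty := by
    rw [List.foldl_map]
    rfl
  rw [h1, PySem.Dict.getD_foldl_modify_append, pv_scan_snd]
  simp [PySem.Dict.getD_empty]

-- B's successor lookup is A's successor scan
theorem pv_succ_eq (transitions : List (String × String)) (v : String) :
    (transitions.foldl (fun d q => d.modify q.1 [] (· ++ [q.2])) PySem.Dict.empty).getD v []
    = transitions.filterMap (fun q => if q.1 = v then some q.2 else none) := by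
  rw [PySem.Dict.getD_foldl_modify_append, pv_scan_fst]
  simp [PySem.Dict.getD_empty]

-- subset-of-the-holds-list vs all-in-the-holds-set, over a deduplicated vs raw scan
theorem pv_all_mem (S lh : List String) :
    PySem.Set.issubset (PySem.Set.ofList S) lh
      = S.all (fun t => PySem.Set.contains (PySem.Set.ofList lh) t) := by
  rw [Bool.eq_iff_iff]
  simp only [PySem.Set.issubset, List.all_eq_true, PySem.Set.contains, List.contains_eq_mem,
    decide_eq_true_eq, PySem.Set.mem_ofList]

-- the two inner conditions agree
theorem pv_cond_eq (transitions : List (String × String)) (list_holds_p : List String) (p : String) :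
    PySem.Set.issubset
      (PySem.Set.ofList (transitions.filterMap (fun q => if q.1 = p then some q.2 else none)))
      list_holds_p
    = ((transitions.foldl (fun d q => d.modify q.1 [] (· ++ [q.2])) PySem.Dict.empty).getD p []).all
        (fun t => (PySem.Set.ofList list_holds_p).contains t) := by
  rw [pv_succ_eq]
  exact pv_all_mem _ _

-- ===== VERDICT (by name: the statement is the Claim_ definition above) =====
theorem pre_image_all_spec : Claim_equal_pre_image_all := by
  intro transitions list_holds_p _
  show pre_image_all transitions list_holds_p = pre_image_all_alt transitions list_holds_p
  have hstep : (fun (pre_list : PySem.Set String) state =>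
      (PySem.Set.ofList (transitions.filterMap (fun p => if p.2 = state then some p.1 else none))).foldl
        (fun pre_list predecessor =>
          if PySem.Set.issubset
              (PySem.Set.ofList (transitions.filterMap (fun p => if p.1 = predecessor then some p.2 else none)))
              list_holds_p
          then PySem.Set.add pre_list predecessor else pre_list) pre_list)
      = (fun (result : PySem.Set String) state =>
      ((transitions.foldl (fun d q => d.modify q.2 [] (· ++ [q.1])) PySem.Dict.empty).getD state []).foldl
        (fun result p =>
          if ((transitions.foldl (fun d q => d.modify q.1 [] (· ++ [q.2])) PySem.Dict.empty).getD p []).all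
              (fun t => (PySem.Set.ofList list_holds_p).contains t)
          then PySem.Set.add result p else result) result) := by
    funext acc state
    have hc : (fun (a : PySem.Set String) (predecessor : String) =>
        if PySem.Set.issubset
            (PySem.Set.ofList (transitions.filterMap (fun p => if p.1 = predecessor then some p.2 else none)))
            list_holds_p
        then PySem.Set.add a predecessor else a)
        = (fun (a : PySem.Set String) (p : String) =>
        if ((transitions.foldl (fun d q => d.modify q.1 [] (· ++ [q.2])) PySem.Dict.empty).getD p []).all
            (fun t => (PySem.Set.ofList list_holds_p).contains t)
        then PySem.Set.add a p else a) := by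
      funext a p
      rw [pv_cond_eq]
    rw [pv_pred_eq, hc]
    exact pv_foldl_step_ofList _ acc _
  simp only [pre_image_all, pre_image_all_alt]
  rw [PySem.List.foldl_prod_mk
      (fun (d : PySem.Dict String (List String)) (q : String × String) =>
        d.modify q.1 [] (· ++ [q.2]))
      (fun (d : PySem.Dict String (List String)) (q : String × String) =>
        d.modify q.2 [] (· ++ [q.1]))
      transitions PySem.Dict.empty PySem.Dict.empty]
  rw [hstep]
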